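-- pv_equiv track=rewrite | github.com/FEAger13/MathHelperbot | bot.py | format_exponent
-- ===== SOURCE A (Python) =====
-- def format_exponent(expr_str):
--     superscript_map = {"0":"⁰","1":"¹","2":"²","3":"³","4":"⁴","5":"⁵",
--                        "6":"⁶","7":"⁷","8":"⁸","9":"⁹"}
--     result = ""
--     i = 0
--     while i < len(expr_str):
--         if expr_str[i] == "^" and i+1 < len(expr_str):
--             exp = expr_str[i+1]
--             result += superscript_map.get(exp, exp)
--             i += 2
--         else:
--             result += expr_str[i]
--             i += 1
--     return result
-- ===== SOURCE B (Python) =====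
-- import re
--
-- def format_exponent(expr_str):
--     superscript_map = {"0":"⁰","1":"¹","2":"²","3":"³","4":"⁴","5":"⁵",
--                        "6":"⁶","7":"⁷","8":"⁸","9":"⁹"}
--     return re.sub(r'\^(.)',
--                   lambda m: superscript_map.get(m.group(1), m.group(1)),
--                   expr_str, flags=re.DOTALL)
-- ===== Notes on version B (the rewrite author's own statement) =====
-- stated objective: faster
-- what changed: Replaced the manual index-stepping while loop that builds the result by repeated string concatenation with a single re.sub on the pattern \^(.) (DOTALL) whose lambda maps the captured character through the superscript table.
import Mathlib
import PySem

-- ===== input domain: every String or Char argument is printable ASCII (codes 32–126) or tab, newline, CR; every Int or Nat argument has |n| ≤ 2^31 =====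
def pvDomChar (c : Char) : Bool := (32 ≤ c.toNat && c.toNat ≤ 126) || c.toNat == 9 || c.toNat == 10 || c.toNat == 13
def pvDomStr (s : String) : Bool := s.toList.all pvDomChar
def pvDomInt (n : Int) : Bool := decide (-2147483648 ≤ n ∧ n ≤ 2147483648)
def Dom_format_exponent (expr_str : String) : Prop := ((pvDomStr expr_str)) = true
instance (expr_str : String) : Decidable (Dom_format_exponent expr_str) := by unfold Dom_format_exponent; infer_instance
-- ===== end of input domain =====

-- B replaces A's index-stepping while loop by one regex substitution re.sub(r'\^(.)', …); return values proved equal.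

-- the superscript_map dict of both programs (keys are the one-char strings, held as Char)
def pvSupMap : PySem.Dict Char String :=
  PySem.Dict.ofList [('0', "⁰"), ('1', "¹"), ('2', "²"), ('3', "³"), ('4', "⁴"), ('5', "⁵"),
   ('6', "⁶"), ('7', "⁷"), ('8', "⁸"), ('9', "⁹")]

-- ===== PORT A =====
-- A's while loop: result accumulator, index i stepping by 2 after '^'+char, else by 1.
def pvLoopA : List Char → String → String
  | [], result => result
  | c :: rest, result =>
    -- 'expr_str[i] == "^" and i+1 < len(expr_str)'
    if c = '^' ∧ rest ≠ [] then
      match rest with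
      | c2 :: rest2 => pvLoopA rest2 (result ++ (pvSupMap.getD c2 (String.singleton c2)))
      | [] => result  -- unreachable (rest ≠ [])
    else
      pvLoopA rest (result ++ String.singleton c)

def format_exponent (expr_str : String) : String :=
  pvLoopA expr_str.toList ""

-- ===== PORT B =====
-- hand port of re.sub(r'\^(.)', lambda m: superscript_map.get(m.group(1), m.group(1)), s, flags=re.DOTALL):
-- re.sub scans left to right; the pattern matches a literal '^' followed by any one character (DOTALL),
-- replacing the pair by the mapped character; unmatched characters (including a trailing lone '^') are copied.
-- This recursion is exact for that regex on every string.
def pvSubB : List Char → String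
  | '^' :: c :: rest => (pvSupMap.getD c (String.singleton c)) ++ pvSubB rest
  | c :: rest => String.singleton c ++ pvSubB rest
  | [] => ""

def format_exponent_alt (expr_str : String) : String :=
  pvSubB expr_str.toList

-- ===== PRECONDITION & SPEC =====
def Spec_format_exponent (expr_str : String) (out : String) : Prop := out = format_exponent_alt expr_str
instance (expr_str : String) (out : String) : Decidable (Spec_format_exponent expr_str out) := by unfold Spec_format_exponent; infer_instance

-- ===== CLAIM (what is proved, stated in full; the proofs are below) =====
def Claim_equal_format_exponent : Prop := ∀ (expr_str : String), Dom_format_exponent expr_str → Spec_format_exponent expr_str (format_exponent expr_str)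

-- ===== LEMMAS AND PROOFS =====

theorem pvLoopA_eq (l : List Char) : ∀ res, pvLoopA l res = res ++ pvSubB l := by
  induction l using pvSubB.induct with
  | case1 c rest ih =>
    intro res
    rw [pvSubB, pvLoopA.eq_def]
    simp only [ne_eq, reduceCtorEq, not_false_eq_true, and_true]
    rw [ih]
    simp [String.append_assoc]
  | case2 c rest h ih =>
    intro res
    rcases rest with _ | ⟨r, rs⟩
    · simp [pvLoopA, pvSubB]
    · have hc : c ≠ '^' := fun e => h r rs e rfl
      rw [pvLoopA.eq_def]
      simp only [List.cons.injEq]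
      rw [if_neg (by simp [hc]), ih]
      conv_rhs => rw [pvSubB.eq_def]
      simp only [String.append_assoc]
  | case3 =>
    intro res
    simp [pvSubB, pvLoopA]

-- ===== VERDICT (by name: the statement is the Claim_ definition above) =====
theorem format_exponent_spec : Claim_equal_format_exponent := by
  intro s _
  unfold Spec_format_exponent format_exponent format_exponent_alt
  rw [pvLoopA_eq]
  simp
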